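-- pv_equiv track=rewrite | github.com/wFeeL/store_ies_data | main.py | contiguous_windows
-- ===== SOURCE A (Python) =====
-- def contiguous_windows (flags ,min_len =1 ):
-- 	out =[]
-- 	start =None
-- 	for i ,flag in enumerate (flags ):
-- 		if flag and start is None :
-- 			start =i
-- 		elif not flag and start is not None :
-- 			if i -start >=min_len :
-- 				out .append ((start ,i -1 ))
-- 			start =None
-- 	if start is not None and len (flags )-start >=min_len :
-- 		out .append ((start ,len (flags )-1 ))
-- 	return out
-- ===== SOURCE B (Python) =====
-- def contiguous_windows(flags, min_len=1):
--     bools = [bool(f) for f in flags]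
--     prevs = [False] + bools
--     nexts = bools[1:] + [False]
--     starts = [i for i, (b, p) in enumerate(zip(bools, prevs)) if b and not p]
--     ends = [i for i, (b, nx) in enumerate(zip(bools, nexts)) if b and not nx]
--     return [(s, e) for s, e in zip(starts, ends) if e - s + 1 >= min_len]
-- ===== Notes on version B (the rewrite author's own statement) =====
-- stated objective: alternative
-- what changed: Replaces A's single-pass start-sentinel state machine (with a final boundary flush) by stateless staged passes: edge detection via zipping flags with shifted copies yields the list of run starts and the list of run ends, which are paired positionally and filtered by length.
import Mathlib
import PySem

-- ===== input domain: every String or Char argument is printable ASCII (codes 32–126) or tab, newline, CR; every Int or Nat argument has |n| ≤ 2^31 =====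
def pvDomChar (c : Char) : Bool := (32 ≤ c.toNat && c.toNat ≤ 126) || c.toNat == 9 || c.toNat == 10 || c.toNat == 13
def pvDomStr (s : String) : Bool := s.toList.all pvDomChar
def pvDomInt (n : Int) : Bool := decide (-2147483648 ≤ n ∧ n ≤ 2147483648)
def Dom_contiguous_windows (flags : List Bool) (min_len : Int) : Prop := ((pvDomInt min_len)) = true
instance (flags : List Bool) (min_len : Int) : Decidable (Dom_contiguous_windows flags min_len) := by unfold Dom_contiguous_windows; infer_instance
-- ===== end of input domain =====

-- B replaces A's start-sentinel state machine (with final flush) by stateless staged passes: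
-- edge detection against shifted copies of flags gives the start and end lists, zipped and filtered; alternative, same cost.


-- ===== PORT A =====
-- A's loop over enumerate(flags): state is (out, start); branches in A's order
def cwLoop (min_len : Int) : List (Int × Bool) → List (Int × Int) × Option Int → List (Int × Int) × Option Int
  | [], st => st
  | (i, flag) :: rest, (out, start) =>
    if flag ∧ start = none then cwLoop min_len rest (out, some i)
    else if ¬flag ∧ start ≠ none then
      match start with
      | some s => cwLoop min_len rest ((if i - s ≥ min_len then out ++ [(s, i - 1)] else out), none)
      | none   => cwLoop min_len rest (out, none)   -- unreachable (start ≠ none in this branch)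
    else cwLoop min_len rest (out, start)

def contiguous_windows (flags : List Bool) (min_len : Int) : List (Int × Int) :=
  let st := cwLoop min_len (PySem.List.enumerate flags) ([], none)
  match st.2 with
  | some s => if (flags.length : Int) - s ≥ min_len then st.1 ++ [(s, (flags.length : Int) - 1)] else st.1
  | none => st.1

-- ===== PORT B =====
-- staged passes: starts = indices whose flag is true and left neighbour (flags shifted right) false,
-- ends = indices whose flag is true and right neighbour (flags shifted left) false; zip and filter by length
def contiguous_windows_alt (flags : List Bool) (min_len : Int) : List (Int × Int) :=
  let prevs := false :: flags                    -- [False] + bools (zip truncates the longer list)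
  let nexts := flags.drop 1 ++ [false]           -- bools[1:] + [False]
  let starts := (PySem.List.enumerate (flags.zip prevs)).filterMap
    (fun p => if p.2.1 ∧ ¬p.2.2 then some p.1 else none)
  let ends := (PySem.List.enumerate (flags.zip nexts)).filterMap
    (fun p => if p.2.1 ∧ ¬p.2.2 then some p.1 else none)
  (starts.zip ends).filter (fun p => p.2 - p.1 + 1 ≥ min_len)

-- ===== PRECONDITION & SPEC =====
def Spec_contiguous_windows (flags : List Bool) (min_len : Int) (out : List (Int × Int)) : Prop := out = contiguous_windows_alt flags min_len
instance (flags : List Bool) (min_len : Int) (out : List (Int × Int)) : Decidable (Spec_contiguous_windows flags min_len out) := by unfold Spec_contiguous_windows; infer_instance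

-- ===== CLAIM (what is proved, stated in full; the proofs are below) =====
def Claim_equal_contiguous_windows : Prop := ∀ (flags : List Bool) (min_len : Int), Dom_contiguous_windows flags min_len → Spec_contiguous_windows flags min_len (contiguous_windows flags min_len)

-- ===== LEMMAS AND PROOFS =====

-- canonical (start, end) list of the maximal true runs, carried by an open-run state
def runsSt : List Bool → Option Int → Int → List (Int × Int)
  | [], none, _ => []
  | [], some s, i => [(s, i - 1)]
  | false :: r, none, i => runsSt r none (i + 1)
  | false :: r, some s, i => (s, i - 1) :: runsSt r none (i + 1)
  | true :: r, none, i => runsSt r (some i) (i + 1)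
  | true :: r, some s, i => runsSt r (some s) (i + 1)

-- recursive form of B's starts pass (prev = previous flag)
def startsRec : List Bool → Bool → Int → List Int
  | [], _, _ => []
  | f :: r, prev, i => if f ∧ ¬prev then i :: startsRec r f (i + 1) else startsRec r f (i + 1)

-- recursive form of B's ends pass (lookahead at the next flag)
def endsRec : List Bool → Int → List Int
  | [], _ => []
  | f :: r, i => if f ∧ ¬(r.headD false) then i :: endsRec r (i + 1) else endsRec r (i + 1)

theorem startsFM (flags : List Bool) : ∀ (prev : Bool) (i : Int),
    (PySem.List.enumerate (flags.zip (prev :: flags)) i).filterMap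
      (fun p => if p.2.1 ∧ ¬p.2.2 then some p.1 else none) = startsRec flags prev i := by
  induction flags with
  | nil => intro prev i; simp [PySem.List.enumerate_nil, startsRec]
  | cons f r ih =>
    intro prev i
    rw [List.zip_cons_cons, PySem.List.enumerate_cons, List.filterMap_cons]
    cases f <;> cases prev <;> simp [startsRec] <;>
      first
        | simpa using ih false (i + 1)
        | simpa using ih true (i + 1)

theorem endsFM (flags : List Bool) : ∀ (i : Int),
    (PySem.List.enumerate (flags.zip (flags.drop 1 ++ [false])) i).filterMap
      (fun p => if p.2.1 ∧ ¬p.2.2 then some p.1 else none) = endsRec flags i := by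
  induction flags with
  | nil => intro i; simp [PySem.List.enumerate_nil, endsRec]
  | cons f r ih =>
    intro i
    cases r with
    | nil =>
      by_cases h : f = true <;>
        simp [PySem.List.enumerate_cons, PySem.List.enumerate_nil, endsRec, h]
    | cons g r' =>
      have hzip : (f :: g :: r').zip ((f :: g :: r').drop 1 ++ [false])
          = (f, g) :: (g :: r').zip ((g :: r').drop 1 ++ [false]) := by simp
      rw [hzip, PySem.List.enumerate_cons, List.filterMap_cons]
      cases f <;> cases g <;> simp [endsRec] <;>
        simpa [endsRec] using ih (i + 1)

theorem runs_fst (flags : List Bool) : ∀ (i : Int),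
    (runsSt flags none i).map Prod.fst = startsRec flags false i ∧
    ∀ (s : Int), (runsSt flags (some s) i).map Prod.fst = s :: startsRec flags true i := by
  induction flags with
  | nil => intro i; simp [runsSt, startsRec]
  | cons f r ih =>
    intro i
    cases f with
    | false =>
      refine ⟨?_, fun s => ?_⟩
      · simpa [runsSt, startsRec] using (ih (i + 1)).1
      · simpa [runsSt, startsRec] using congrArg (s :: ·) (ih (i + 1)).1
    | true =>
      refine ⟨?_, fun s => ?_⟩
      · simpa [runsSt, startsRec] using (ih (i + 1)).2 i
      · simpa [runsSt, startsRec] using (ih (i + 1)).2 s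

theorem runs_snd (flags : List Bool) : ∀ (i : Int),
    (runsSt flags none i).map Prod.snd = endsRec flags i ∧
    ∀ (s : Int), (runsSt flags (some s) i).map Prod.snd = endsRec (true :: flags) (i - 1) := by
  induction flags with
  | nil => intro i; simp [runsSt, endsRec]
  | cons f r ih =>
    intro i
    cases f with
    | false =>
      refine ⟨?_, fun s => ?_⟩
      · simpa [runsSt, endsRec] using (ih (i + 1)).1
      · have h := (ih (i + 1)).1
        simp only [runsSt, endsRec, List.headD_cons, List.map_cons]
        simp [h, show i - 1 + 1 = i from by ring]
    | true =>
      refine ⟨?_, fun s => ?_⟩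
      · have h := (ih (i + 1)).2 i
        simpa [runsSt, endsRec, show i + 1 - 1 = i from by ring] using h
      · have h := (ih (i + 1)).2 s
        simp only [runsSt] at h ⊢
        rw [h]
        simp [endsRec, show i + 1 - 1 = i from by ring, show i - 1 + 1 = i from by ring]

-- A's final flush, as a function of the total length
def cwFinish (m n : Int) (st : List (Int × Int) × Option Int) : List (Int × Int) :=
  match st.2 with
  | some s => if n - s ≥ m then st.1 ++ [(s, n - 1)] else st.1
  | none => st.1

theorem cwA_main (m : Int) (flags : List Bool) : ∀ (i : Int) (out : List (Int × Int)) (st : Option Int),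
    cwFinish m (i + flags.length) (cwLoop m (PySem.List.enumerate flags i) (out, st))
      = out ++ (runsSt flags st i).filter (fun p => p.2 - p.1 + 1 ≥ m) := by
  induction flags with
  | nil =>
    intro i out st
    cases st with
    | none => simp [PySem.List.enumerate_nil, cwLoop, cwFinish, runsSt]
    | some s =>
      simp only [PySem.List.enumerate_nil, cwLoop, cwFinish, runsSt, List.length_nil,
        Nat.cast_zero, add_zero, List.filter]
      have : (decide (i - 1 - s + 1 ≥ m)) = decide (i - s ≥ m) := by
        by_cases h : i - s ≥ m
        · simp [h, show i - 1 - s + 1 ≥ m from by omega]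
        · simp [h, show ¬(i - 1 - s + 1 ≥ m) from by omega]
      rw [this]
      by_cases h : i - s ≥ m <;> simp [h]
  | cons f r ih =>
    intro i out st
    rw [PySem.List.enumerate_cons]
    have hlen : i + (((f :: r).length : Nat) : Int) = (i + 1) + (r.length : Int) := by
      simp only [List.length_cons]; push_cast; ring
    cases st with
    | none =>
      cases f with
      | true =>
        show cwFinish m (i + ((true :: r).length : Nat))
            (cwLoop m (PySem.List.enumerate r (i + 1)) (out, some i)) = _
        rw [hlen, ih (i + 1) out (some i)]
        simp [runsSt]
      | false =>
        show cwFinish m (i + ((false :: r).length : Nat))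
            (cwLoop m (PySem.List.enumerate r (i + 1)) (out, none)) = _
        rw [hlen, ih (i + 1) out none]
        simp [runsSt]
    | some s =>
      cases f with
      | true =>
        show cwFinish m (i + ((true :: r).length : Nat))
            (cwLoop m (PySem.List.enumerate r (i + 1)) (out, some s)) = _
        rw [hlen, ih (i + 1) out (some s)]
        simp [runsSt]
      | false =>
        show cwFinish m (i + ((false :: r).length : Nat))
            (cwLoop m (PySem.List.enumerate r (i + 1))
              ((if i - s ≥ m then out ++ [(s, i - 1)] else out), none)) = _
        rw [hlen, ih (i + 1) _ none]
        simp only [runsSt, List.filter]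
        have : (decide (i - 1 - s + 1 ≥ m)) = decide (i - s ≥ m) := by
          by_cases h : i - s ≥ m
          · simp [h, show i - 1 - s + 1 ≥ m from by omega]
          · simp [h, show ¬(i - 1 - s + 1 ≥ m) from by omega]
        rw [this]
        by_cases h : i - s ≥ m <;> simp [h]

-- ===== VERDICT (by name: the statement is the Claim_ definition above) =====
theorem contiguous_windows_spec : Claim_equal_contiguous_windows := by
  intro flags min_len _
  show contiguous_windows flags min_len = contiguous_windows_alt flags min_len
  have hB : contiguous_windows_alt flags min_len
      = (runsSt flags none 0).filter (fun p => p.2 - p.1 + 1 ≥ min_len) := by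
    show ((((PySem.List.enumerate (flags.zip (false :: flags)) 0).filterMap
        (fun p => if p.2.1 ∧ ¬p.2.2 then some p.1 else none)).zip
        ((PySem.List.enumerate (flags.zip (flags.drop 1 ++ [false])) 0).filterMap
        (fun p => if p.2.1 ∧ ¬p.2.2 then some p.1 else none))).filter
        (fun p => p.2 - p.1 + 1 ≥ min_len)) = _
    rw [startsFM flags false 0, endsFM flags 0,
        ← (runs_fst flags 0).1, ← (runs_snd flags 0).1, List.zip_map']
    simp
  have hA : contiguous_windows flags min_len
      = (runsSt flags none 0).filter (fun p => p.2 - p.1 + 1 ≥ min_len) := by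
    have h := cwA_main min_len flags 0 [] none
    rw [zero_add] at h
    unfold cwFinish at h
    simp only [List.nil_append] at h
    show (match (cwLoop min_len (PySem.List.enumerate flags) ([], none)).2 with
      | some s => if (flags.length : Int) - s ≥ min_len then
          (cwLoop min_len (PySem.List.enumerate flags) ([], none)).1 ++ [(s, (flags.length : Int) - 1)]
          else (cwLoop min_len (PySem.List.enumerate flags) ([], none)).1
      | none => (cwLoop min_len (PySem.List.enumerate flags) ([], none)).1) = _
    rcases hst : cwLoop min_len (PySem.List.enumerate flags) ([], none) with ⟨o, so⟩
    rw [hst] at h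
    cases so <;> simpa using h
  rw [hA, hB]
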